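-- pv_equiv track=rewrite | github.com/GomaJoma/email-parser | main.py | extract_email
-- ===== SOURCE A (Python) =====
-- def extract_email(row):
--     for el in row.split('>'):
--         if '@' in el:
--             for ell in el.split('<'):
--                 if '@' in ell:
--                     for elll in ell.split(' '):
--                         if '@' in elll:
--                             if 'href="' in elll:
--                                 if ':' in elll:
--                                     email = elll.split(':')[-1][:-1]
--                                 else:
--                                     email = elll.split('=')[-1].strip('"')
--                             else:
--                                 email = elll
--                             return email
-- ===== SOURCE B (Python) =====
-- def extract_email(row):
--     # One flat pass: split on all three delimiters at once, then take the
--     # first token containing '@' and clean it up.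
--     tokens = []
--     cur = []
--     for ch in row:
--         if ch in '<> ':
--             tokens.append(''.join(cur))
--             cur = []
--         else:
--             cur.append(ch)
--     tokens.append(''.join(cur))
--     for tok in tokens:
--         if '@' in tok:
--             if 'href="' in tok:
--                 if ':' in tok:
--                     return tok.split(':')[-1][:-1]
--                 return tok.split('=')[-1].strip('"')
--             return tok
--     return None
-- ===== Notes on version B (the rewrite author's own statement) =====
-- stated objective: simpler
-- what changed: Replaces the three nested split loops ('>' then '<' then ' ') by one flat character pass that tokenizes on all three delimiters at once, then a single scan taking the first token containing '@' with the same href cleanup.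
import Mathlib
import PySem

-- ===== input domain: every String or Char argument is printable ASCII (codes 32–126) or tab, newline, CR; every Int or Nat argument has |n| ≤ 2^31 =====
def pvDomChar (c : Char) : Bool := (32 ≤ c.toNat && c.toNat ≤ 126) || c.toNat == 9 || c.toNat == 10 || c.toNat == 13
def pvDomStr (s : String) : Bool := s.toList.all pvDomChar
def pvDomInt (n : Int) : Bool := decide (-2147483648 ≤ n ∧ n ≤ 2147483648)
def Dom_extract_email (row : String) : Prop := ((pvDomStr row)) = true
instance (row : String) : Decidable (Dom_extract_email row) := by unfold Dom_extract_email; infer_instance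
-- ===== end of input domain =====

-- B replaces A's three nested split loops by one flat tokenization pass plus one scan; objective: simpler.

-- Both Pythons contain the identical cleanup code for the found token; it is one shared helper here.
def pvClean (t : List Char) : List Char :=
  if PySem.Chars.isIn "href=\"".toList t then
    if PySem.Chars.isIn [':'] t then
      PySem.List.slice (PySem.List.pyGetD (PySem.Chars.splitOn t [':']) (-1) []) none (some (-1))
    else
      PySem.Chars.stripChars (PySem.List.pyGetD (PySem.Chars.splitOn t ['=']) (-1) []) ['"']
  else t

-- ===== PORT A =====
def pvLoop3 : List (List Char) → Option (List Char)
  | [] => none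
  | t :: r => if PySem.Chars.isIn ['@'] t then some (pvClean t) else pvLoop3 r

def pvLoop2 : List (List Char) → Option (List Char)
  | [] => none
  | p :: r =>
    if PySem.Chars.isIn ['@'] p then
      match pvLoop3 (PySem.Chars.splitOn p [' ']) with
      | some v => some v
      | none => pvLoop2 r
    else pvLoop2 r

def pvLoop1 : List (List Char) → Option (List Char)
  | [] => none
  | p :: r =>
    if PySem.Chars.isIn ['@'] p then
      match pvLoop2 (PySem.Chars.splitOn p ['<']) with
      | some v => some v
      | none => pvLoop1 r
    else pvLoop1 r

def extract_email (row : String) : Option String :=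
  (pvLoop1 (PySem.Chars.splitOn row.toList ['>'])).map String.ofList

-- ===== PORT B =====
-- the single character pass of Source B: cut a new token at each '<', '>' or ' '
def pvTokens (s : List Char) : List (List Char) :=
  let r := s.foldl
    (fun (p : List (List Char) × List Char) ch =>
      if ("<> ".toList).contains ch then (p.1 ++ [p.2], ([] : List Char)) else (p.1, p.2 ++ [ch]))
    ([], [])
  r.1 ++ [r.2]

-- the single token scan of Source B
def pvFindB : List (List Char) → Option (List Char)
  | [] => none
  | t :: r => if PySem.Chars.isIn ['@'] t then some (pvClean t) else pvFindB r

def extract_email_alt (row : String) : Option String :=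
  (pvFindB (pvTokens row.toList)).map String.ofList

-- ===== PRECONDITION & SPEC =====
def Spec_extract_email (row : String) (out : Option String) : Prop := out = extract_email_alt row
instance (row : String) (out : Option String) : Decidable (Spec_extract_email row out) := by unfold Spec_extract_email; infer_instance

-- ===== CLAIM (what is proved, stated in full; the proofs are below) =====
def Claim_equal_extract_email : Prop := ∀ (row : String), Dom_extract_email row → Spec_extract_email row (extract_email row)

-- ===== LEMMAS AND PROOFS =====

-- apply f to the head piece only
def pvMapHead (f : List Char → List Char) : List (List Char) → List (List Char)
  | [] => []
  | t :: ts => f t :: ts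

-- structural split of a char list on a predicate (empty pieces kept, like str.split(sep))
def pvSplitP (P : Char → Bool) : List Char → List (List Char)
  | [] => [[]]
  | x :: xs => if P x then [] :: pvSplitP P xs else pvMapHead (x :: ·) (pvSplitP P xs)

theorem pvSplitP_ne_nil (P : Char → Bool) (l : List Char) : pvSplitP P l ≠ [] := by
  induction l with
  | nil => simp [pvSplitP]
  | cons x xs ih =>
    simp only [pvSplitP]
    split
    · simp
    · cases h : pvSplitP P xs with
      | nil => exact absurd h ih
      | cons t ts => simp [pvMapHead]

theorem pvSplitP_congr (P Q : Char → Bool) (h : ∀ x, P x = Q x) (l : List Char) :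
    pvSplitP P l = pvSplitP Q l := by
  induction l with
  | nil => rfl
  | cons x xs ih => simp [pvSplitP, h x, ih]

theorem pvSplitOn_go_eq (c : Char) (l : List Char) :
    ∀ (fuel : Nat) (cur : List Char) (acc : List (List Char)), l.length < fuel →
      PySem.Chars.splitOn.go [c] fuel l cur acc
        = acc.reverse ++ pvMapHead (cur.reverse ++ ·) (pvSplitP (· == c) l) := by
  induction l with
  | nil =>
    intro fuel cur acc hf
    match fuel, hf with
    | fuel + 1, _ => simp [PySem.Chars.splitOn.go, pvSplitP, pvMapHead]
  | cons x xs ih =>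
    intro fuel cur acc hf
    match fuel, hf with
    | fuel + 1, hf =>
      rw [PySem.Chars.splitOn.go]
      by_cases hx : x = c
      · subst hx
        simp only [List.isPrefixOf, List.length_cons] at hf ⊢
        simp only [BEq.rfl, Bool.true_and, if_pos, List.length_nil,
          List.drop_succ_cons, List.drop_zero]
        rw [ih fuel [] (cur.reverse :: acc) (by omega)]
        simp only [pvSplitP, BEq.rfl, if_pos, pvMapHead, List.nil_append, List.reverse_nil]
        cases h : pvSplitP (fun y => y == x) xs with
        | nil => exact absurd h (pvSplitP_ne_nil _ _)
        | cons t ts => simp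
      · have hbeq : ([x] : List Char).isPrefixOf (x :: xs) = true := by simp [List.isPrefixOf]
        have hne : ([c] : List Char).isPrefixOf (x :: xs) = false := by
          simp [List.isPrefixOf]
          exact fun h => absurd h.symm hx
        simp only [List.length_cons] at hf
        rw [hne]
        simp only [Bool.false_eq_true, if_false]
        rw [ih fuel (x :: cur) acc (by omega)]
        have hPx : (x == c) = false := by simp [hx]
        simp only [pvSplitP, hPx, Bool.false_eq_true, if_false]
        cases h : pvSplitP (· == c) xs with
        | nil => exact absurd h (pvSplitP_ne_nil _ _)
        | cons t ts => simp [pvMapHead]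

theorem pvSplitOn_eq (c : Char) (l : List Char) :
    PySem.Chars.splitOn l [c] = pvSplitP (· == c) l := by
  unfold PySem.Chars.splitOn
  rw [pvSplitOn_go_eq c l (l.length + 1) [] [] (by omega)]
  cases h : pvSplitP (· == c) l with
  | nil => exact absurd h (pvSplitP_ne_nil _ _)
  | cons t ts => simp [pvMapHead]

theorem pvSplitP_flatten (P : Char → Bool) (l : List Char) :
    (pvSplitP P l).flatten = l.filter (fun x => !P x) := by
  induction l with
  | nil => simp [pvSplitP]
  | cons x xs ih =>
    simp only [pvSplitP]
    by_cases hx : P x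
    · simp [hx, ih]
    · cases h : pvSplitP P xs with
      | nil => exact absurd h (pvSplitP_ne_nil _ _)
      | cons t ts =>
        rw [h] at ih
        simp only [List.filter_cons, hx, Bool.not_false, if_pos, pvMapHead, List.flatten_cons] at *
        simp [← ih]

theorem pvMem_of_mem_splitP (P : Char → Bool) (l t : List Char) (a : Char)
    (ht : t ∈ pvSplitP P l) (ha : a ∈ t) : a ∈ l := by
  have : a ∈ (pvSplitP P l).flatten := List.mem_flatten.mpr ⟨t, ht, ha⟩
  rw [pvSplitP_flatten] at this
  exact List.mem_of_mem_filter this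

theorem pvFindB_append (l₁ l₂ : List (List Char)) :
    pvFindB (l₁ ++ l₂) = (pvFindB l₁).or (pvFindB l₂) := by
  induction l₁ with
  | nil => simp [pvFindB]
  | cons t r ih =>
    simp only [List.cons_append, pvFindB]
    split
    · rfl
    · exact ih

theorem pvFindB_none_of_all (ts : List (List Char))
    (h : ∀ t ∈ ts, PySem.Chars.isIn ['@'] t = false) : pvFindB ts = none := by
  induction ts with
  | nil => rfl
  | cons t r ih =>
    simp only [pvFindB, h t (by simp), Bool.false_eq_true, if_false]
    exact ih (fun t' ht' => h t' (by simp [ht']))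

theorem pvNoAt_of_mem_splitP (P : Char → Bool) (p q : List Char)
    (hq : q ∈ pvSplitP P p) (h : PySem.Chars.isIn ['@'] p = false) :
    PySem.Chars.isIn ['@'] q = false := by
  rw [PySem.Chars.isIn_eq_false_iff] at h ⊢
  intro hin
  exact h ((List.singleton_infix_iff _ _).mpr
    (pvMem_of_mem_splitP P p q '@' hq ((List.singleton_infix_iff _ _).mp hin)))

theorem pvFindB_flatMap_none (qs : List (List Char)) (f : List Char → List (List Char))
    (h : ∀ q ∈ qs, pvFindB (f q) = none) : pvFindB (qs.flatMap f) = none := by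
  induction qs with
  | nil => rfl
  | cons q r ih =>
    rw [List.flatMap_cons, pvFindB_append, h q (by simp), Option.none_or]
    exact ih (fun q' hq' => h q' (by simp [hq']))

theorem pvLoop3_eq (ts : List (List Char)) : pvLoop3 ts = pvFindB ts := by
  induction ts with
  | nil => rfl
  | cons t r ih => simp only [pvLoop3, pvFindB, ih]

theorem pvLoop2_eq (ps : List (List Char)) :
    pvLoop2 ps = pvFindB (ps.flatMap (fun p => pvSplitP (· == ' ') p)) := by
  induction ps with
  | nil => rfl
  | cons p r ih =>
    simp only [pvLoop2, List.flatMap_cons, pvFindB_append]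
    by_cases hp : PySem.Chars.isIn ['@'] p
    · rw [if_pos hp, pvLoop3_eq, pvSplitOn_eq, ih]
      cases pvFindB (pvSplitP (· == ' ') p) <;> simp [Option.or]
    · rw [if_neg (by simp [hp]), ih,
        pvFindB_none_of_all _ (fun t ht => pvNoAt_of_mem_splitP _ p t ht (Bool.eq_false_iff.mpr hp)),
        Option.none_or]

theorem pvLoop1_eq (ps : List (List Char)) :
    pvLoop1 ps = pvFindB (ps.flatMap
      (fun p => (pvSplitP (· == '<') p).flatMap (fun q => pvSplitP (· == ' ') q))) := by
  induction ps with
  | nil => rfl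
  | cons p r ih =>
    simp only [pvLoop1, List.flatMap_cons, pvFindB_append]
    by_cases hp : PySem.Chars.isIn ['@'] p
    · rw [if_pos hp, pvLoop2_eq, pvSplitOn_eq, ih]
      cases pvFindB ((pvSplitP (· == '<') p).flatMap (fun q => pvSplitP (· == ' ') q)) <;>
        simp [Option.or]
    · rw [if_neg (by simp [hp]), ih,
        pvFindB_flatMap_none _ _ (fun q hq => pvFindB_none_of_all _
          (fun t ht => pvNoAt_of_mem_splitP _ q t ht
            (pvNoAt_of_mem_splitP _ p q hq (Bool.eq_false_iff.mpr hp)))),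
        Option.none_or]

theorem pvSplitP_or (P Q : Char → Bool) (s : List Char) :
    pvSplitP (fun x => P x || Q x) s = (pvSplitP P s).flatMap (fun p => pvSplitP Q p) := by
  induction s with
  | nil => simp [pvSplitP]
  | cons x xs ih =>
    by_cases hP : P x
    · simp only [pvSplitP, ih]
      simp [pvSplitP, hP]
    · obtain ⟨t, ts, h⟩ : ∃ t ts, pvSplitP P xs = t :: ts := by
        cases h : pvSplitP P xs with
        | nil => exact absurd h (pvSplitP_ne_nil _ _)
        | cons a b => exact ⟨a, b, rfl⟩
      rw [h] at ih
      by_cases hQ : Q x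
      · simp only [pvSplitP, h, pvMapHead, List.flatMap_cons, ih]
        simp [pvSplitP, hP, hQ]
      · have h1 : (P x || Q x) = false := by simp [hP, hQ]
        simp only [pvSplitP, h, pvMapHead, List.flatMap_cons, ih]
        cases hh : pvSplitP Q t with
        | nil => exact absurd hh (pvSplitP_ne_nil _ _)
        | cons u us => simp [pvSplitP, pvMapHead, hP, hQ, hh]

theorem pvTokens_foldl (s : List Char) :
    ∀ (toks : List (List Char)) (cur : List Char),
      (let r := s.foldl
        (fun (p : List (List Char) × List Char) ch =>
          if ("<> ".toList).contains ch then (p.1 ++ [p.2], ([] : List Char)) else (p.1, p.2 ++ [ch]))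
        (toks, cur)
       r.1 ++ [r.2])
        = toks ++ pvMapHead (fun t => cur ++ t) (pvSplitP (fun ch => ("<> ".toList).contains ch) s) := by
  induction s with
  | nil => intro toks cur; simp [pvSplitP, pvMapHead]
  | cons x xs ih =>
    intro toks cur
    simp only [List.foldl_cons]
    by_cases hx : ("<> ".toList).contains x
    · rw [if_pos hx]
      rw [ih (toks ++ [cur]) []]
      simp only [pvSplitP, hx, if_pos, List.append_assoc]
      cases h : pvSplitP (fun ch => ("<> ".toList).contains ch) xs with
      | nil => exact absurd h (pvSplitP_ne_nil _ _)
      | cons t ts => simp [pvMapHead]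
    · rw [if_neg hx]
      rw [ih toks (cur ++ [x])]
      simp only [pvSplitP, hx, Bool.false_eq_true, if_false]
      cases h : pvSplitP (fun ch => ("<> ".toList).contains ch) xs with
      | nil => exact absurd h (pvSplitP_ne_nil _ _)
      | cons t ts => simp [pvMapHead]

theorem pvTokens_eq (s : List Char) :
    pvTokens s = pvSplitP (fun ch => ("<> ".toList).contains ch) s := by
  unfold pvTokens
  rw [pvTokens_foldl s [] []]
  cases h : pvSplitP (fun ch => ("<> ".toList).contains ch) s with
  | nil => exact absurd h (pvSplitP_ne_nil _ _)
  | cons t ts => simp [pvMapHead]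

theorem pvPred_eq (x : Char) :
    (("<> ".toList).contains x) = ((x == '>') || ((x == '<') || (x == ' '))) := by
  show (['<', '>', ' '].contains x) = _
  simp only [List.contains_cons, List.contains_nil, Bool.or_false]
  cases hx : (x == '<') <;> cases hy : (x == '>') <;> cases hz : (x == ' ') <;> simp_all

theorem pvMain (s : List Char) :
    pvLoop1 (PySem.Chars.splitOn s ['>']) = pvFindB (pvTokens s) := by
  rw [pvTokens_eq, pvSplitP_congr _ _ pvPred_eq,
    pvSplitP_or (· == '>') (fun x => (x == '<') || (x == ' ')), pvSplitOn_eq, pvLoop1_eq]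
  have h2 : ∀ p, pvSplitP (fun x => (x == '<') || (x == ' ')) p
      = (pvSplitP (· == '<') p).flatMap (fun q => pvSplitP (· == ' ') q) :=
    fun p => pvSplitP_or _ _ p
  simp only [h2]

-- ===== VERDICT (by name: the statement is the Claim_ definition above) =====
theorem extract_email_spec : Claim_equal_extract_email := by
  intro row _
  unfold Spec_extract_email extract_email extract_email_alt
  rw [pvMain]
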